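-- pv_equiv track=rewrite | github.com/forthcoming/algorithm | MurmurHash.py | murmur_hash
-- ===== SOURCE A (Python) =====
-- def fmix( h ):
--     h ^= h >> 16
--     h  = ( h * 0x85ebca6b ) & 0xFFFFFFFF
--     h ^= h >> 13
--     h  = ( h * 0xc2b2ae35 ) & 0xFFFFFFFF
--     h ^= h >> 16
--     return h
--
-- def murmur_hash( key, seed ):  # Implements MurmurHash3_x86_32 hash.
--     key = bytearray(key.encode())  # pay attention
--     length = len( key )
--     nblocks = length >>2
--     h1 = seed
--
--     c1 = 0xcc9e2d51
--     c2 = 0x1b873593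
--
--     for block_start in range( 0, nblocks * 4, 4 ):
--         k1 = key[ block_start + 3 ] << 24 | key[ block_start + 2 ] << 16 |  key[ block_start + 1 ] <<  8 |  key[ block_start + 0 ]
--         k1 = ( c1 * k1 ) & 0xFFFFFFFF
--         k1 = ( k1 << 15 | k1 >> 17 ) & 0xFFFFFFFF # inlined ROTL32
--         k1 = ( c2 * k1 ) & 0xFFFFFFFF
--
--         h1 ^= k1
--         h1  = ( h1 << 13 | h1 >> 19 ) & 0xFFFFFFFF # inlined ROTL32
--         h1  = ( h1 * 5 + 0xe6546b64 ) & 0xFFFFFFFF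
--
--     tail_index = nblocks * 4
--     k1 = 0
--     tail_size = length & 3
--
--     if tail_size >= 3:
--         k1 ^= key[ tail_index + 2 ] << 16
--     if tail_size >= 2:
--         k1 ^= key[ tail_index + 1 ] << 8
--     if tail_size >= 1:
--         k1 ^= key[ tail_index + 0 ]
--     if tail_size > 0:
--         k1  = ( k1 * c1 ) & 0xFFFFFFFF
--         k1  = ( k1 << 15 | k1 >> 17 ) & 0xFFFFFFFF # inlined ROTL32
--         k1  = ( k1 * c2 ) & 0xFFFFFFFF
--         h1 ^= k1
--     return fmix( h1 ^ length )
-- ===== SOURCE B (Python) =====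
-- def fmix(h):
--     h ^= h >> 16
--     h = (h * 0x85ebca6b) & 0xFFFFFFFF
--     h ^= h >> 13
--     h = (h * 0xc2b2ae35) & 0xFFFFFFFF
--     h ^= h >> 16
--     return h
--
-- def murmur_hash(key, seed):
--     # single streaming pass over the bytes: accumulate each byte into k1 at the
--     # current shift; every full 32-bit word is mixed into h1, a leftover partial
--     # word gets the tail mix.
--     data = key.encode()
--     h1 = seed
--     k1 = 0
--     shift = 0
--     for byte in data:
--         k1 ^= byte << shift
--         shift += 8
--         if shift == 32:
--             k1 = (k1 * 0xcc9e2d51) & 0xFFFFFFFF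
--             k1 = (k1 << 15 | k1 >> 17) & 0xFFFFFFFF
--             k1 = (k1 * 0x1b873593) & 0xFFFFFFFF
--             h1 ^= k1
--             h1 = (h1 << 13 | h1 >> 19) & 0xFFFFFFFF
--             h1 = (h1 * 5 + 0xe6546b64) & 0xFFFFFFFF
--             k1 = 0
--             shift = 0
--     if shift:
--         k1 = (k1 * 0xcc9e2d51) & 0xFFFFFFFF
--         k1 = (k1 << 15 | k1 >> 17) & 0xFFFFFFFF
--         k1 = (k1 * 0x1b873593) & 0xFFFFFFFF
--         h1 ^= k1
--     return fmix(h1 ^ len(data))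
-- ===== Notes on version B (the rewrite author's own statement) =====
-- stated objective: alternative
-- what changed: Replaces block-indexed iteration (range over word offsets with 4-way indexing) plus a three-branch tail if-chain by one uniform streaming pass over the bytes that XORs each byte into k1 at the current shift and mixes whenever a 32-bit word fills, with a single leftover tail mix.
import Mathlib
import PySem

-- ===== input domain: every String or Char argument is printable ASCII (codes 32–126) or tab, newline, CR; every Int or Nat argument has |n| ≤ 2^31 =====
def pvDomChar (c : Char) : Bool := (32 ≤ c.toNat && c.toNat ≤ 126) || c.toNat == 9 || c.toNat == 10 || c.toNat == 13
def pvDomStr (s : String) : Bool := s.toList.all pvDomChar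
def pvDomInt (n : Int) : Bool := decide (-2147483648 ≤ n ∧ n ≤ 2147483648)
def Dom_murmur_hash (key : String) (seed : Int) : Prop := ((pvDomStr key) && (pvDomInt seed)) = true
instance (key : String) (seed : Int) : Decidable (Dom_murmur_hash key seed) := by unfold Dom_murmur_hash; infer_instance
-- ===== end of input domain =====

-- B re-implements MurmurHash3_x86_32 as one streaming pass over the bytes (XOR each byte
-- into k1 at the current shift, mix when a word fills) instead of A's block-indexed loop
-- plus three tail if-guards; objective: alternative decomposition, same O(n) cost.

-- ===== PORT A =====
-- helper fmix, verbatim from A (Source B carries the identical fmix; the B port shares this definition)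
def fmix (h : Int) : Int :=
  let h := PySem.Int.bxor h (h >>> (16:Nat))
  let h := PySem.Int.band (h * 0x85ebca6b) 0xFFFFFFFF
  let h := PySem.Int.bxor h (h >>> (13:Nat))
  let h := PySem.Int.band (h * 0xc2b2ae35) 0xFFFFFFFF
  let h := PySem.Int.bxor h (h >>> (16:Nat))
  h

-- the body of A's `for block_start in range(0, nblocks*4, 4)` loop, named so the fold can be
-- stated about it (c1/c2 written as their literal values); key[i] is always in range in this
-- loop, so pyGetD with default 0 is exact
def murmurBlock (keyB : List Int) (h1 : Int) (block_start : Int) : Int :=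
  let k1 := PySem.Int.bor (PySem.Int.bor (PySem.Int.bor (PySem.List.pyGetD keyB (block_start + 3) 0 <<< (24:Nat)) (PySem.List.pyGetD keyB (block_start + 2) 0 <<< (16:Nat))) (PySem.List.pyGetD keyB (block_start + 1) 0 <<< (8:Nat))) (PySem.List.pyGetD keyB (block_start + 0) 0)
  let k1 := PySem.Int.band (0xcc9e2d51 * k1) 0xFFFFFFFF
  let k1 := PySem.Int.band (PySem.Int.bor (k1 <<< (15:Nat)) (k1 >>> (17:Nat))) 0xFFFFFFFF
  let k1 := PySem.Int.band (0x1b873593 * k1) 0xFFFFFFFF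
  let h1 := PySem.Int.bxor h1 k1
  let h1 := PySem.Int.band (PySem.Int.bor (h1 <<< (13:Nat)) (h1 >>> (19:Nat))) 0xFFFFFFFF
  let h1 := PySem.Int.band (h1 * 5 + 0xe6546b64) 0xFFFFFFFF
  h1

def murmur_hash (key : String) (seed : Int) : Int :=
  -- bytearray(key.encode()): on the ASCII domain each byte is the character's code point
  let keyB : List Int := key.toList.map (fun c => (c.toNat : Int))
  let length : Int := (keyB.length : Int)
  let nblocks : Int := length >>> (2:Nat)
  let h1 := seed
  let h1 := (PySem.List.pyRange 0 (nblocks * 4) 4).foldl (murmurBlock keyB) h1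
  let tail_index : Int := nblocks * 4
  let k1 : Int := 0
  let tail_size : Int := PySem.Int.band length 3
  let k1 := if 3 ≤ tail_size then PySem.Int.bxor k1 (PySem.List.pyGetD keyB (tail_index + 2) 0 <<< (16:Nat)) else k1
  let k1 := if 2 ≤ tail_size then PySem.Int.bxor k1 (PySem.List.pyGetD keyB (tail_index + 1) 0 <<< (8:Nat)) else k1
  let k1 := if 1 ≤ tail_size then PySem.Int.bxor k1 (PySem.List.pyGetD keyB (tail_index + 0) 0) else k1
  let h1 := if 0 < tail_size then
      let k1 := PySem.Int.band (k1 * 0xcc9e2d51) 0xFFFFFFFF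
      let k1 := PySem.Int.band (PySem.Int.bor (k1 <<< (15:Nat)) (k1 >>> (17:Nat))) 0xFFFFFFFF
      let k1 := PySem.Int.band (k1 * 0x1b873593) 0xFFFFFFFF
      PySem.Int.bxor h1 k1
    else h1
  fmix (PySem.Int.bxor h1 length)

-- ===== PORT B =====
-- B's streaming `for byte in data` loop; shift only ever takes the values 0,8,16,24, so a Nat
def mmLoop (bs : List Int) (h1 k1 : Int) (shift : Nat) : Int × Int × Nat :=
  match bs with
  | [] => (h1, k1, shift)
  | byte :: rest =>
    let k1 := PySem.Int.bxor k1 (byte <<< shift)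
    let shift := shift + 8
    if shift = 32 then
      let k1 := PySem.Int.band (k1 * 0xcc9e2d51) 0xFFFFFFFF
      let k1 := PySem.Int.band (PySem.Int.bor (k1 <<< (15:Nat)) (k1 >>> (17:Nat))) 0xFFFFFFFF
      let k1 := PySem.Int.band (k1 * 0x1b873593) 0xFFFFFFFF
      let h1 := PySem.Int.bxor h1 k1
      let h1 := PySem.Int.band (PySem.Int.bor (h1 <<< (13:Nat)) (h1 >>> (19:Nat))) 0xFFFFFFFF
      let h1 := PySem.Int.band (h1 * 5 + 0xe6546b64) 0xFFFFFFFF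
      mmLoop rest h1 0 0
    else
      mmLoop rest h1 k1 shift

def murmur_hash_alt (key : String) (seed : Int) : Int :=
  -- key.encode(): on the ASCII domain each byte is the character's code point
  let data : List Int := key.toList.map (fun c => (c.toNat : Int))
  let r := mmLoop data seed 0 0
  let h1 := r.1
  let k1 := r.2.1
  let shift := r.2.2
  let h1 := if shift ≠ 0 then
      let k1 := PySem.Int.band (k1 * 0xcc9e2d51) 0xFFFFFFFF
      let k1 := PySem.Int.band (PySem.Int.bor (k1 <<< (15:Nat)) (k1 >>> (17:Nat))) 0xFFFFFFFF
      let k1 := PySem.Int.band (k1 * 0x1b873593) 0xFFFFFFFF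
      PySem.Int.bxor h1 k1
    else h1
  fmix (PySem.Int.bxor h1 (data.length : Int))

-- ===== PRECONDITION & SPEC =====
def Spec_murmur_hash (key : String) (seed : Int) (out : Int) : Prop := out = murmur_hash_alt key seed
instance (key : String) (seed : Int) (out : Int) : Decidable (Spec_murmur_hash key seed out) := by unfold Spec_murmur_hash; infer_instance

-- ===== CLAIM (what is proved, stated in full; the proofs are below) =====
def Claim_equal_murmur_hash : Prop := ∀ (key : String) (seed : Int), Dom_murmur_hash key seed → Spec_murmur_hash key seed (murmur_hash key seed)

-- ===== LEMMAS AND PROOFS =====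

-- canonical chunked evaluation both loops reduce to: consume four bytes at a time
def chunkGo : List Int → Int → Int
  | b0 :: b1 :: b2 :: b3 :: rest, h1 => chunkGo rest (murmurBlock [b0, b1, b2, b3] h1 0)
  | _, h1 => h1

-- B's accumulated k1 over a partial trailing word
def tailAcc : List Int → Int
  | [a] => PySem.Int.bxor 0 (a <<< (0:Nat))
  | [a, b] => PySem.Int.bxor (PySem.Int.bxor 0 (a <<< (0:Nat))) (b <<< (8:Nat))
  | [a, b, c] => PySem.Int.bxor (PySem.Int.bxor (PySem.Int.bxor 0 (a <<< (0:Nat))) (b <<< (8:Nat))) (c <<< (16:Nat))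
  | _ => 0

lemma byteBit {a : Nat} (i k : Nat) (h : a < 2 ^ k) (hk : k ≤ i) : a.testBit i = false :=
  Nat.testBit_lt_two_pow (lt_of_lt_of_le h (Nat.pow_le_pow_right (by omega) hk))

-- OR-assembly of a little-endian word equals XOR-assembly, on byte-sized operands
lemma word4 (a b c d : Nat) (ha : a < 256) (hb : b < 256) (hc : c < 256) :
    ((d <<< 24 ||| c <<< 16) ||| b <<< 8) ||| a = ((a ^^^ b <<< 8) ^^^ c <<< 16) ^^^ d <<< 24 := by
  apply Nat.eq_of_testBit_eq; intro i
  simp only [Nat.testBit_or, Nat.testBit_xor, Nat.testBit_shiftLeft]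
  rcases Nat.lt_or_ge i 8 with h8 | h8
  · simp [show ¬ (8:Nat) ≤ i by omega, show ¬ (16:Nat) ≤ i by omega, show ¬ (24:Nat) ≤ i by omega]
  rcases Nat.lt_or_ge i 16 with h16 | h16
  · simp [byteBit i 8 ha h8, show ¬ (16:Nat) ≤ i by omega, show ¬ (24:Nat) ≤ i by omega, h8]
  rcases Nat.lt_or_ge i 24 with h24 | h24
  · simp [byteBit i 8 ha (by omega), byteBit (i-8) 8 hb (by omega), show ¬ (24:Nat) ≤ i by omega, h8, h16]
  · simp [byteBit i 8 ha (by omega), byteBit (i-8) 8 hb (by omega), byteBit (i-16) 8 hc (by omega), h8, h16, h24]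

lemma and_three (L : Nat) : L &&& 3 = L % 4 := by
  apply Nat.eq_of_testBit_eq; intro i
  rw [show (4:Nat) = 2^2 by norm_num, Nat.testBit_mod_two_pow, Nat.testBit_and]
  match i with
  | 0 => simp [show Nat.testBit 3 0 = true by decide]
  | 1 => simp [show Nat.testBit 3 1 = true by decide]
  | (n+2) => simp [show Nat.testBit 3 (n+2) = false by simp [Nat.testBit_succ]]

lemma chunkGo_short (bs : List Int) (h1 : Int) (h : bs.length < 4) : chunkGo bs h1 = h1 := by
  rcases bs with _ | ⟨a, _ | ⟨b, _ | ⟨c, _ | ⟨d, t⟩⟩⟩⟩ <;> simp [chunkGo] <;> simp at h <;> omega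

lemma pyRange4 (n : Nat) : PySem.List.pyRange 0 ((4*n : Nat) : Int) 4 = (List.range n).map (fun k => ((4*k : Nat) : Int)) := by
  rw [PySem.List.pyRange_of_pos 0 ((4*n : Nat) : Int) (by norm_num)]
  rcases Nat.eq_zero_or_pos n with h | h
  · subst h; simp
  · have hc : (0:Int) < ((4*n : Nat) : Int) := by exact_mod_cast by omega
    rw [if_pos hc]
    have : ((((4*n : Nat) : Int) - 0 + 4 - 1) / 4).toNat = n := by
      have : (((4*n : Nat) : Int) - 0 + 4 - 1) = ((4*n + 3 : Nat) : Int) := by push_cast; ring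
      rw [this, show (4:Int) = ((4:Nat):Int) from rfl, ← Int.natCast_div]
      simp; omega
    rw [this]
    apply List.map_congr_left
    intro k hk
    push_cast; ring

lemma getD_shift (l : List Int) (b0 b1 b2 b3 : Int) (j : Nat) :
    (b0 :: b1 :: b2 :: b3 :: l).getD (j+4) 0 = l.getD j 0 := rfl

lemma murmurBlock_cons4 (b0 b1 b2 b3 : Int) (rest : List Int) (h : Int) (k : Nat) :
    murmurBlock (b0 :: b1 :: b2 :: b3 :: rest) h ((4*(k+1) : Nat) : Int) = murmurBlock rest h ((4*k : Nat) : Int) := by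
  simp only [murmurBlock]
  rw [show ((4*(k+1) : Nat) : Int) + 3 = ((4*k+3)+4 : Nat) by push_cast; ring]
  rw [show ((4*(k+1) : Nat) : Int) + 2 = ((4*k+2)+4 : Nat) by push_cast; ring]
  rw [show ((4*(k+1) : Nat) : Int) + 1 = ((4*k+1)+4 : Nat) by push_cast; ring]
  rw [show ((4*(k+1) : Nat) : Int) + 0 = ((4*k+0)+4 : Nat) by push_cast; ring]
  rw [show ((4*k : Nat) : Int) + 3 = ((4*k+3 : Nat) : Int) by push_cast; ring]
  rw [show ((4*k : Nat) : Int) + 2 = ((4*k+2 : Nat) : Int) by push_cast; ring]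
  rw [show ((4*k : Nat) : Int) + 1 = ((4*k+1 : Nat) : Int) by push_cast; ring]
  rw [show ((4*k : Nat) : Int) + 0 = ((4*k+0 : Nat) : Int) by push_cast; ring]
  simp only [PySem.List.pyGetD_natCast, getD_shift, Nat.add_zero]

lemma murmurBlock_head (b0 b1 b2 b3 : Int) (rest : List Int) (h : Int) :
    murmurBlock (b0 :: b1 :: b2 :: b3 :: rest) h ((4*0 : Nat) : Int) = murmurBlock [b0, b1, b2, b3] h 0 := by
  simp only [murmurBlock]
  rw [show ((4*0 : Nat) : Int) + 3 = ((3:Nat) : Int) by norm_num,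
      show ((4*0 : Nat) : Int) + 2 = ((2:Nat) : Int) by norm_num,
      show ((4*0 : Nat) : Int) + 1 = ((1:Nat) : Int) by norm_num,
      show ((4*0 : Nat) : Int) + 0 = ((0:Nat) : Int) by norm_num,
      show (0:Int) + 3 = ((3:Nat) : Int) by norm_num,
      show (0:Int) + 2 = ((2:Nat) : Int) by norm_num,
      show (0:Int) + 1 = ((1:Nat) : Int) by norm_num,
      show (0:Int) + 0 = ((0:Nat) : Int) by norm_num]
  simp only [PySem.List.pyGetD_natCast]
  rfl

lemma foldA : ∀ (n : Nat) (bs : List Int) (h1 : Int), 4*n ≤ bs.length → bs.length < 4*n + 4 →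
    (List.range n).foldl (fun h k => murmurBlock bs h ((4*k : Nat) : Int)) h1 = chunkGo bs h1 := by
  intro n
  induction n with
  | zero => intro bs h1 _ hub; simp [chunkGo_short bs h1 (by omega)]
  | succ n ih =>
    intro bs h1 hlb hub
    rcases bs with _ | ⟨b0, _ | ⟨b1, _ | ⟨b2, _ | ⟨b3, rest⟩⟩⟩⟩ <;> simp at hlb hub ⊢ <;> try omega
    rw [List.range_succ_eq_map, List.foldl_cons, List.foldl_map]
    have step : ∀ (h : Int) (k : Nat),
        murmurBlock (b0 :: b1 :: b2 :: b3 :: rest) h ((4*(k+1) : Nat) : Int) = murmurBlock rest h ((4*k : Nat) : Int) :=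
      fun h k => murmurBlock_cons4 b0 b1 b2 b3 rest h k
    calc (List.range n).foldl (fun h k => murmurBlock (b0::b1::b2::b3::rest) h ((4*(Nat.succ k) : Nat) : Int))
            (murmurBlock (b0::b1::b2::b3::rest) h1 ((4*0 : Nat) : Int))
        = (List.range n).foldl (fun h k => murmurBlock rest h ((4*k : Nat) : Int))
            (murmurBlock [b0,b1,b2,b3] h1 0) := by
          rw [murmurBlock_head]
          exact PySem.List.foldl_congr_mem _ _ _ _ (fun acc x _ => step acc x)
      _ = chunkGo rest (murmurBlock [b0,b1,b2,b3] h1 0) := ih _ _ (by omega) (by omega)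
      _ = chunkGo (b0::b1::b2::b3::rest) h1 := by rw [chunkGo]

lemma word_cast (m0 m1 m2 m3 : Nat) (h0 : m0 < 256) (h1 : m1 < 256) (h2 : m2 < 256) :
    PySem.Int.bor (PySem.Int.bor (PySem.Int.bor (((m3:Int)) <<< (24:Nat)) (((m2:Int)) <<< (16:Nat))) (((m1:Int)) <<< (8:Nat))) ((m0:Int))
    = PySem.Int.bxor (PySem.Int.bxor (PySem.Int.bxor (PySem.Int.bxor 0 (((m0:Int)) <<< (0:Nat))) (((m1:Int)) <<< (8:Nat))) (((m2:Int)) <<< (16:Nat))) (((m3:Int)) <<< (24:Nat)) := by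
  rw [show (0:Int) = ((0:Nat):Int) from rfl]
  simp only [← Int.natCast_shiftLeft, PySem.Int.bor_natCast, PySem.Int.bxor_natCast]
  norm_cast
  simp only [Nat.zero_xor, Nat.shiftLeft_zero]
  exact word4 m0 m1 m2 m3 h0 h1 h2

lemma mix_eq (m0 m1 m2 m3 : Nat) (hm0 : m0 < 256) (hm1 : m1 < 256) (hm2 : m2 < 256) (h1 : Int) :
    (let k1 := PySem.Int.bxor (PySem.Int.bxor (PySem.Int.bxor (PySem.Int.bxor 0 (((m0:Int)) <<< (0:Nat))) (((m1:Int)) <<< (8:Nat))) (((m2:Int)) <<< (16:Nat))) (((m3:Int)) <<< (24:Nat))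
     let k1 := PySem.Int.band (k1 * 0xcc9e2d51) 0xFFFFFFFF
     let k1 := PySem.Int.band (PySem.Int.bor (k1 <<< (15:Nat)) (k1 >>> (17:Nat))) 0xFFFFFFFF
     let k1 := PySem.Int.band (k1 * 0x1b873593) 0xFFFFFFFF
     let h1 := PySem.Int.bxor h1 k1
     let h1 := PySem.Int.band (PySem.Int.bor (h1 <<< (13:Nat)) (h1 >>> (19:Nat))) 0xFFFFFFFF
     PySem.Int.band (h1 * 5 + 0xe6546b64) 0xFFFFFFFF)
    = murmurBlock [(m0:Int), (m1:Int), (m2:Int), (m3:Int)] h1 0 := by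
  simp only [murmurBlock]
  rw [show (0:Int) + 3 = ((3:Nat) : Int) by norm_num,
      show (0:Int) + 2 = ((2:Nat) : Int) by norm_num,
      show (0:Int) + 1 = ((1:Nat) : Int) by norm_num,
      show (0:Int) + 0 = ((0:Nat) : Int) by norm_num]
  simp only [PySem.List.pyGetD_natCast]
  rw [show ([(m0:Int), (m1:Int), (m2:Int), (m3:Int)].getD 3 0) = (m3:Int) from rfl,
      show ([(m0:Int), (m1:Int), (m2:Int), (m3:Int)].getD 2 0) = (m2:Int) from rfl,
      show ([(m0:Int), (m1:Int), (m2:Int), (m3:Int)].getD 1 0) = (m1:Int) from rfl,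
      show ([(m0:Int), (m1:Int), (m2:Int), (m3:Int)].getD 0 0) = (m0:Int) from rfl]
  rw [← word_cast m0 m1 m2 m3 hm0 hm1 hm2]
  rw [Int.mul_comm _ (3432918353:Int), Int.mul_comm _ (461845907:Int)]

lemma mmLoop_go : ∀ (n : Nat) (bs : List Int) (h1 : Int),
    (∀ x ∈ bs, ∃ m : Nat, x = (m : Int) ∧ m < 256) → 4*n ≤ bs.length → bs.length < 4*n + 4 →
    mmLoop bs h1 0 0 = (chunkGo bs h1, tailAcc (bs.drop (4*n)), 8 * (bs.length - 4*n)) := by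
  intro n
  induction n with
  | zero =>
    intro bs h1 _ _ hub
    rcases bs with _ | ⟨a, _ | ⟨b, _ | ⟨c, _ | ⟨d, t⟩⟩⟩⟩
    · simp [mmLoop, chunkGo, tailAcc]
    · simp [mmLoop, chunkGo, tailAcc]
    · simp [mmLoop, chunkGo, tailAcc]
    · simp [mmLoop, chunkGo, tailAcc]
    · simp at hub; omega
  | succ n ih =>
    intro bs h1 hbytes hlb hub
    rcases bs with _ | ⟨b0, _ | ⟨b1, _ | ⟨b2, _ | ⟨b3, rest⟩⟩⟩⟩ <;> simp at hlb hub ⊢ <;> try omega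
    obtain ⟨m0, rfl, hm0⟩ := hbytes b0 (by simp)
    obtain ⟨m1, rfl, hm1⟩ := hbytes b1 (by simp)
    obtain ⟨m2, rfl, hm2⟩ := hbytes b2 (by simp)
    obtain ⟨m3, rfl, hm3⟩ := hbytes b3 (by simp)
    have unfold4 : mmLoop ((m0:Int) :: (m1:Int) :: (m2:Int) :: (m3:Int) :: rest) h1 0 0
        = mmLoop rest (murmurBlock [(m0:Int), (m1:Int), (m2:Int), (m3:Int)] h1 0) 0 0 := by
      rw [← mix_eq m0 m1 m2 m3 hm0 hm1 hm2 h1]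
      simp only [mmLoop]
      norm_num
    rw [unfold4, ih rest _ (fun x hx => hbytes x (by simp [hx])) (by omega) (by omega)]
    have hdrop : ((m0:Int) :: (m1:Int) :: (m2:Int) :: (m3:Int) :: rest).drop (4*(n+1)) = rest.drop (4*n) := by
      rw [show 4*(n+1) = (4*n)+1+1+1+1 by ring]
      simp [List.drop_succ_cons]
    rw [show chunkGo ((m0:Int) :: (m1:Int) :: (m2:Int) :: (m3:Int) :: rest) h1
          = chunkGo rest (murmurBlock [(m0:Int), (m1:Int), (m2:Int), (m3:Int)] h1 0) from rfl, hdrop]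
    congr 2
    omega

-- ===== VERDICT (by name: the statement is the Claim_ definition above) =====
theorem murmur_hash_spec : Claim_equal_murmur_hash := by
  intro key seed hdom
  unfold Spec_murmur_hash
  have hdom' : pvDomStr key = true := by
    unfold Dom_murmur_hash at hdom; exact (Bool.and_eq_true_iff.mp hdom).1
  set bs : List Int := key.toList.map (fun c => (c.toNat : Int)) with hbs
  have hbytes : ∀ x ∈ bs, ∃ m : Nat, x = (m : Int) ∧ m < 256 := by
    intro x hx
    rw [hbs] at hx
    obtain ⟨c, hc, rfl⟩ := List.mem_map.mp hx
    refine ⟨c.toNat, rfl, ?_⟩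
    have := List.all_eq_true.mp hdom' c hc
    unfold pvDomChar at this
    simp only [Bool.or_eq_true, Bool.and_eq_true, decide_eq_true_eq, beq_iff_eq] at this
    omega
  set L : Nat := bs.length with hL
  simp only [murmur_hash, murmur_hash_alt]
  rw [show ((L:Int) >>> (2:Nat)) = ((L/4 : Nat) : Int) by
        rw [show ((L:Int) >>> (2:Nat)) = ((L >>> 2 : Nat) : Int) from Int.natCast_shiftRight L 2,
            Nat.shiftRight_eq_div_pow]]
  rw [show ((L/4 : Nat) : Int) * 4 = ((4*(L/4) : Nat) : Int) by push_cast; ring]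
  rw [pyRange4 (L/4), List.foldl_map, foldA (L/4) bs seed (by omega) (by omega)]
  rw [mmLoop_go (L/4) bs seed hbytes (by omega) (by omega)]
  rw [show PySem.Int.band (L:Int) 3 = ((L % 4 : Nat) : Int) by
        rw [show (3:Int) = ((3:Nat):Int) from rfl, PySem.Int.band_natCast, and_three]]
  have hg : ∀ j : Nat, PySem.List.pyGetD bs (((4*(L/4) : Nat) : Int) + (j:Int)) 0 = (bs.drop (4*(L/4))).getD j 0 := by
    intro j
    rw [show ((4*(L/4) : Nat) : Int) + (j:Int) = ((4*(L/4)+j : Nat) : Int) by push_cast; ring,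
        PySem.List.pyGetD_natCast]
    simp [List.getD_eq_getElem?_getD, List.getElem?_drop]
  rw [show ((4*(L/4) : Nat) : Int) + 2 = ((4*(L/4) : Nat) : Int) + ((2:Nat):Int) from rfl,
      show ((4*(L/4) : Nat) : Int) + 1 = ((4*(L/4) : Nat) : Int) + ((1:Nat):Int) from rfl,
      show ((4*(L/4) : Nat) : Int) + 0 = ((4*(L/4) : Nat) : Int) + ((0:Nat):Int) from rfl,
      hg 2, hg 1, hg 0]
  have hmod : L - 4*(L/4) = L % 4 := by omega
  rw [hmod]
  set rest : List Int := bs.drop (4*(L/4)) with hrest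
  have hrlen : rest.length = L % 4 := by
    rw [hrest, List.length_drop]; omega
  have hrsub : ∀ x ∈ rest, ∃ m : Nat, x = (m : Int) ∧ m < 256 :=
    fun x hx => hbytes x (List.drop_subset _ _ hx)
  rcases rest with _ | ⟨a, _ | ⟨b, _ | ⟨c, _ | ⟨d, t⟩⟩⟩⟩
  · -- L % 4 = 0
    have h0 : L % 4 = 0 := by simpa using hrlen.symm
    rw [h0]
    norm_num [tailAcc]
  · -- L % 4 = 1
    have h0 : L % 4 = 1 := by simpa using hrlen.symm
    obtain ⟨ma, rfl, _⟩ := hrsub a (by simp)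
    rw [h0]
    norm_num [tailAcc]
  · -- L % 4 = 2
    have h0 : L % 4 = 2 := by simpa using hrlen.symm
    obtain ⟨ma, rfl, _⟩ := hrsub (a) (by simp)
    obtain ⟨mb, rfl, _⟩ := hrsub (b) (by simp)
    rw [h0]
    norm_num [tailAcc]
    have e2 : PySem.Int.bxor (PySem.Int.bxor 0 ((mb:Int) <<< (8:Nat))) (ma:Int)
        = PySem.Int.bxor (PySem.Int.bxor 0 (ma:Int)) ((mb:Int) <<< (8:Nat)) := by
      rw [show (0:Int) = ((0:Nat):Int) from rfl]
      simp only [← Int.natCast_shiftLeft, PySem.Int.bxor_natCast]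
      norm_cast
      simp [Nat.zero_xor, Nat.xor_comm]
    rw [e2]
  · -- L % 4 = 3
    have h0 : L % 4 = 3 := by simpa using hrlen.symm
    obtain ⟨ma, rfl, _⟩ := hrsub (a) (by simp)
    obtain ⟨mb, rfl, _⟩ := hrsub (b) (by simp)
    obtain ⟨mc, rfl, _⟩ := hrsub (c) (by simp)
    rw [h0]
    norm_num [tailAcc]
    have e3 : PySem.Int.bxor (PySem.Int.bxor (PySem.Int.bxor 0 ((mc:Int) <<< (16:Nat))) ((mb:Int) <<< (8:Nat))) (ma:Int)
        = PySem.Int.bxor (PySem.Int.bxor (PySem.Int.bxor 0 (ma:Int)) ((mb:Int) <<< (8:Nat))) ((mc:Int) <<< (16:Nat)) := by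
      rw [show (0:Int) = ((0:Nat):Int) from rfl]
      simp only [← Int.natCast_shiftLeft, PySem.Int.bxor_natCast]
      norm_cast
      simp [Nat.zero_xor, Nat.xor_comm, Nat.xor_assoc]
    rw [e3]
  · have := hrlen; simp at this; omega
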